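-- pv_equiv track=rewrite | github.com/kirankumarkanaje/AdaptiveEncryptionSystem | Encryption-Backend.py | lea_encrypt
-- ===== SOURCE A (Python) =====
-- def lea_encrypt(block, key):
--     rounds = 24
--     delta = [0x9E3779B9, 0x3C6EF372, 0x78DDE6E4, 0xF1BBCDCC]
--
--     keys = []
--     for i in range(rounds):
--         keys.append((key[0] + i * delta[0]) & 0xFFFFFFFF)
--         key = key[1:] + key[:1]
--
--     x0, x1, x2, x3 = block
--     for i in range(rounds):
--         x0 = ((x0 ^ keys[i]) + (x1 & ~x2 ^ x3)) & 0xFFFFFFFF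
--         x1 = ((x1 ^ keys[i]) + (x2 & ~x3 ^ x0)) & 0xFFFFFFFF
--         x2 = ((x2 ^ keys[i]) + (x3 & ~x0 ^ x1)) & 0xFFFFFFFF
--         x3 = ((x3 ^ keys[i]) + (x0 & ~x1 ^ x2)) & 0xFFFFFFFF
--     return x0, x1, x2, x3
-- ===== SOURCE B (Python) =====
-- def lea_encrypt(block, key):
--     # Recursive one-pass formulation: instead of A's precomputed keys table
--     # built by rotating list copies, carry three pieces of state through a
--     # tail recursion -- a wrapping cursor j into the untouched key list and a
--     # running additive accumulator acc (acc = i*0x9E3779B9 mod 2^32, updated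
--     # by addition only: no multiplication, no modulo, no list copying).
--     n = len(key)
--
--     def go(x0, x1, x2, x3, r, j, acc):
--         if r == 0:
--             return (x0, x1, x2, x3)
--         k = (key[j] + acc) & 0xFFFFFFFF
--         x0 = ((x0 ^ k) + (x1 & ~x2 ^ x3)) & 0xFFFFFFFF
--         x1 = ((x1 ^ k) + (x2 & ~x3 ^ x0)) & 0xFFFFFFFF
--         x2 = ((x2 ^ k) + (x3 & ~x0 ^ x1)) & 0xFFFFFFFF
--         x3 = ((x3 ^ k) + (x0 & ~x1 ^ x2)) & 0xFFFFFFFF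
--         return go(x0, x1, x2, x3, r - 1, j + 1 if j + 1 < n else 0,
--                   (acc + 0x9E3779B9) & 0xFFFFFFFF)
--
--     x0, x1, x2, x3 = block
--     return go(x0, x1, x2, x3, 24, 0, 0)
-- ===== Notes on version B (the rewrite author's own statement) =====
-- stated objective: faster
-- what changed: B replaces A's two-stage design (a key-schedule loop building a 24-entry keys table by rotating fresh copies of the key list, then a round loop reading the table) with a single tail recursion over the rounds that carries a wrapping cursor into the untouched key list and a running additive accumulator acc = i*0x9E3779B9 mod 2^32, so subkeys are produced by addition only -- no keys table, no list rotation, no multiplication.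
import Mathlib
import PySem

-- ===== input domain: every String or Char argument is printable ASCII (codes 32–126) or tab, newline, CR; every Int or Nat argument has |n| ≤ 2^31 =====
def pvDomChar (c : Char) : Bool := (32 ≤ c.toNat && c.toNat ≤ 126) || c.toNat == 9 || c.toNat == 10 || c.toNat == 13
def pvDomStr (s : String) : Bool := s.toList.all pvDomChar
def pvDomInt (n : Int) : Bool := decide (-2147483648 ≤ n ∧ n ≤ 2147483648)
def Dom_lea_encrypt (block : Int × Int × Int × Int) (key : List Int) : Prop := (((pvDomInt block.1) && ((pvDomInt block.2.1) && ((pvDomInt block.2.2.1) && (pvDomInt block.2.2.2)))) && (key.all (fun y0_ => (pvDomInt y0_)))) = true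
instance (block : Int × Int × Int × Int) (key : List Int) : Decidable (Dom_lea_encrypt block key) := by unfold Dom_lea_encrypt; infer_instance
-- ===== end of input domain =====

-- B replaces A's keys-table-built-by-rotating-list-copies with a single tail
-- recursion over the rounds carrying a wrapping cursor into the untouched key
-- and a running additive subkey accumulator (no table, no rotation, no multiply).
-- Python `~x` is ported exactly as `-x - 1` (infinite two's complement).

-- ===== PORT A =====
-- the round body: four chained updates of (x0,x1,x2,x3) with subkey ki
def leaRoundA (ki : Int) (x : Int × Int × Int × Int) : Int × Int × Int × Int :=
  let x0 := PySem.Int.band (PySem.Int.bxor x.1 ki + PySem.Int.bxor (PySem.Int.band x.2.1 (-x.2.2.1 - 1)) x.2.2.2) 4294967295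
  let x1 := PySem.Int.band (PySem.Int.bxor x.2.1 ki + PySem.Int.bxor (PySem.Int.band x.2.2.1 (-x.2.2.2 - 1)) x0) 4294967295
  let x2 := PySem.Int.band (PySem.Int.bxor x.2.2.1 ki + PySem.Int.bxor (PySem.Int.band x.2.2.2 (-x0 - 1)) x1) 4294967295
  let x3 := PySem.Int.band (PySem.Int.bxor x.2.2.2 ki + PySem.Int.bxor (PySem.Int.band x0 (-x1 - 1)) x2) 4294967295
  (x0, x1, x2, x3)

def lea_encrypt (block : Int × Int × Int × Int) (key : List Int) : Int × Int × Int × Int :=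
  let rounds : Int := 24
  let delta : List Int := [2654435769, 1013904242, 2027808484, 4055616972]
  -- first loop: build the keys table while rotating a copy of key
  let s := (PySem.List.pyRange 0 rounds 1).foldl
    (fun (s : List Int × List Int) i =>
      (s.1 ++ [PySem.Int.band ((PySem.List.pyGet? s.2 0).getD 0 + i * PySem.List.pyGetD delta 0 0) 4294967295],
       PySem.List.slice s.2 (some 1) none ++ PySem.List.slice s.2 none (some 1)))
    ([], key)
  let keys := s.1
  -- second loop: 24 rounds reading keys[i]
  (PySem.List.pyRange 0 rounds 1).foldl
    (fun x i => leaRoundA (PySem.List.pyGetD keys i 0) x) block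

-- ===== PORT B =====
-- Source B's inner recursion `go`: r rounds remaining, wrapping cursor j, accumulator acc;
-- the four x-updates are inlined exactly as in Source B
def leaGo (key : List Int) (n : Int) : Nat → (Int × Int × Int × Int) → Int → Int → Int × Int × Int × Int
  | 0, x, _, _ => x
  | r + 1, x, j, acc =>
      let k := PySem.Int.band ((PySem.List.pyGet? key j).getD 0 + acc) 4294967295
      let x0 := PySem.Int.band (PySem.Int.bxor x.1 k + PySem.Int.bxor (PySem.Int.band x.2.1 (-x.2.2.1 - 1)) x.2.2.2) 4294967295
      let x1 := PySem.Int.band (PySem.Int.bxor x.2.1 k + PySem.Int.bxor (PySem.Int.band x.2.2.1 (-x.2.2.2 - 1)) x0) 4294967295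
      let x2 := PySem.Int.band (PySem.Int.bxor x.2.2.1 k + PySem.Int.bxor (PySem.Int.band x.2.2.2 (-x0 - 1)) x1) 4294967295
      let x3 := PySem.Int.band (PySem.Int.bxor x.2.2.2 k + PySem.Int.bxor (PySem.Int.band x0 (-x1 - 1)) x2) 4294967295
      leaGo key n r (x0, x1, x2, x3) (if j + 1 < n then j + 1 else 0)
        (PySem.Int.band (acc + 2654435769) 4294967295)

def lea_encrypt_alt (block : Int × Int × Int × Int) (key : List Int) : Int × Int × Int × Int :=
  let n : Int := (key.length : Int)
  leaGo key n 24 block 0 0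

-- ===== PRECONDITION & SPEC =====
-- Pre_ excludes only the empty key, on which both A and B raise IndexError (key[0] / key[j]).
def Pre_lea_encrypt (block : Int × Int × Int × Int) (key : List Int) : Prop := key ≠ []
instance (block : Int × Int × Int × Int) (key : List Int) : Decidable (Pre_lea_encrypt block key) := by unfold Pre_lea_encrypt; infer_instance
def pvWitness_lea_encrypt : (Int × Int × Int × Int) × List Int := ((1, 2, 3, 4), [5, 6, 7])

def Spec_lea_encrypt (block : Int × Int × Int × Int) (key : List Int) (out : Int × Int × Int × Int) : Prop := out = lea_encrypt_alt block key
instance (block : Int × Int × Int × Int) (key : List Int) (out : Int × Int × Int × Int) : Decidable (Spec_lea_encrypt block key out) := by unfold Spec_lea_encrypt; infer_instance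

-- ===== CLAIM (what is proved, stated in full; the proofs are below) =====
def Claim_equal_lea_encrypt : Prop := ∀ (block : Int × Int × Int × Int) (key : List Int), Dom_lea_encrypt block key → Pre_lea_encrypt block key → Spec_lea_encrypt block key (lea_encrypt block key)

-- ===== LEMMAS AND PROOFS =====

-- band with the 32-bit mask is emod 2^32 (exactly Python's & 0xFFFFFFFF)
theorem lea_band_mask (x : Int) : PySem.Int.band x 4294967295 = x % 4294967296 := by
  unfold PySem.Int.band
  have hb : (0 : Int) ≤ 4294967295 := by norm_num
  have ht : (4294967295 : Int).toNat = 2 ^ 32 - 1 := by decide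
  by_cases h : 0 ≤ x
  · rw [if_pos h, if_pos hb, ht, Nat.and_two_pow_sub_one_eq_mod]
    omega
  · rw [if_neg h, if_pos hb, ht, Nat.and_comm, Nat.and_two_pow_sub_one_eq_mod]
    omega

-- the per-index subkey A's schedule produces (j rotations, then head)
def leaSubkeyA (key : List Int) (i : Int) : Int :=
  PySem.Int.band ((PySem.List.pyGet? (key.rotate i.toNat) 0).getD 0 + i * 2654435769) 4294967295

-- A's rotation step `key[1:] + key[:1]` is List.rotate 1
theorem lea_rot_eq_rotate (l : List Int) :
    PySem.List.slice l (some 1) none ++ PySem.List.slice l none (some 1) = l.rotate 1 := by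
  cases l with
  | nil => simp [PySem.List.slice]
  | cons a t =>
    rw [List.rotate_eq_drop_append_take (by simp)]
    simp [PySem.List.slice, PySem.List.clampIdx]

-- invariant of A's key-schedule loop
theorem lea_schedule (key : List Int) (m : Nat) :
    (PySem.List.pyRange 0 (m : Int) 1).foldl
      (fun (s : List Int × List Int) i =>
        (s.1 ++ [PySem.Int.band ((PySem.List.pyGet? s.2 0).getD 0 + i * PySem.List.pyGetD ([2654435769, 1013904242, 2027808484, 4055616972] : List Int) 0 0) 4294967295],
         PySem.List.slice s.2 (some 1) none ++ PySem.List.slice s.2 none (some 1)))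
      ([], key)
    = ((PySem.List.pyRange 0 (m : Int) 1).map (leaSubkeyA key), key.rotate m) := by
  induction m with
  | zero => simp [PySem.List.pyRange_one_eq_nil]
  | succ m ih =>
    have h : ((m : Int) + 1) = ((m + 1 : Nat) : Int) := by push_cast; ring
    rw [← h, PySem.List.pyRange_one_succ_right (by positivity), List.foldl_append, List.map_append, ih]
    simp only [List.foldl_cons, List.foldl_nil, List.map_cons, List.map_nil]
    rw [Prod.mk.injEq]
    constructor
    · simp [leaSubkeyA, PySem.List.pyGetD]
    · rw [lea_rot_eq_rotate, List.rotate_rotate]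

-- A's subkey equals the modular-index subkey over the untouched key
theorem lea_subkey_eq (key : List Int) (hk : key ≠ []) (j : Nat) :
    leaSubkeyA key (j : Int) =
    PySem.Int.band ((PySem.List.pyGet? key (((j % key.length : Nat) : Int))).getD 0 + (j : Int) * 2654435769) 4294967295 := by
  have hlen : 0 < key.length := List.length_pos_iff.mpr hk
  have hm : j % key.length < key.length := Nat.mod_lt j hlen
  have h1 : (PySem.List.pyGet? (key.rotate j) 0).getD 0 = key[j % key.length]'hm := by
    rw [PySem.List.pyGet?_zero]
    have hl : 0 < (key.rotate j).length := by simpa using hlen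
    rw [List.getElem?_eq_getElem hl]
    simp [List.getElem_rotate]
  have h2 : (PySem.List.pyGet? key (((j % key.length : Nat) : Int))).getD 0 = key[j % key.length]'hm := by
    rw [PySem.List.pyGet?_natCast, List.getElem?_eq_getElem (by simpa using hm)]
    simp
  unfold leaSubkeyA
  simp only [Int.toNat_natCast]
  rw [h1, h2]

-- one-step unfolding of B's recursion
theorem leaGo_succ (key : List Int) (n : Int) (r : Nat) (x : Int × Int × Int × Int) (j acc : Int) :
    leaGo key n (r + 1) x j acc
    = leaGo key n r (leaRoundA (PySem.Int.band ((PySem.List.pyGet? key j).getD 0 + acc) 4294967295) x)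
        (if j + 1 < n then j + 1 else 0) (PySem.Int.band (acc + 2654435769) 4294967295) := rfl

-- main invariant: B's recursion from round s computes A's remaining fold
theorem lea_main (key : List Int) (hk : key ≠ []) (r : Nat) :
    ∀ (s : Nat) (x : Int × Int × Int × Int),
    leaGo key (key.length : Int) r x ((s % key.length : Nat) : Int)
        (PySem.Int.band ((s : Int) * 2654435769) 4294967295)
    = (PySem.List.pyRange (s : Int) ((s : Int) + (r : Int)) 1).foldl
        (fun x i => leaRoundA (leaSubkeyA key i) x) x := by
  have hlen : 0 < key.length := List.length_pos_iff.mpr hk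
  induction r with
  | zero =>
    intro s x
    rw [PySem.List.pyRange_one_eq_nil (by push_cast; omega)]
    rfl
  | succ r ih =>
    intro s x
    rw [PySem.List.pyRange_one_cons (by push_cast; omega), List.foldl_cons, leaGo_succ]
    have hsub : PySem.Int.band ((PySem.List.pyGet? key (((s % key.length : Nat) : Int))).getD 0 +
        PySem.Int.band ((s : Int) * 2654435769) 4294967295) 4294967295 = leaSubkeyA key (s : Int) := by
      rw [lea_subkey_eq key hk s]
      simp only [lea_band_mask]
      omega
    have hj : (if ((s % key.length : Nat) : Int) + 1 < (key.length : Int) then ((s % key.length : Nat) : Int) + 1 else 0)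
        = (((s + 1) % key.length : Nat) : Int) := by
      have hm : s % key.length < key.length := Nat.mod_lt s hlen
      by_cases hc : s % key.length + 1 < key.length
      · rw [if_pos (by push_cast; omega)]
        have h1 : (1 : Nat) % key.length = 1 := Nat.mod_eq_of_lt (by omega)
        have h2 : (s + 1) % key.length = s % key.length + 1 := by
          rw [Nat.add_mod, h1]
          exact Nat.mod_eq_of_lt hc
        rw [h2]; push_cast; ring
      · rw [if_neg (by push_cast; omega)]
        have he : s % key.length + 1 = key.length := by omega
        have h2 : (s + 1) % key.length = 0 := by
          have hdm := Nat.div_add_mod s key.length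
          have hs1 : s + 1 = key.length * (s / key.length + 1) := by
            rw [Nat.mul_add, Nat.mul_one]
            omega
          rw [hs1, Nat.mul_mod_right]
        rw [h2]
        simp
    have hacc : PySem.Int.band (PySem.Int.band ((s : Int) * 2654435769) 4294967295 + 2654435769) 4294967295
        = PySem.Int.band (((s + 1 : Nat) : Int) * 2654435769) 4294967295 := by
      simp only [lea_band_mask]
      have : (((s + 1 : Nat) : Int)) * 2654435769 = (s : Int) * 2654435769 + 2654435769 := by push_cast; ring
      rw [this]; omega
    rw [hsub, hj, hacc, ih (s + 1) (leaRoundA (leaSubkeyA key (s : Int)) x)]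
    have e2 : (((s + 1 : Nat)) : Int) + (r : Int) = (s : Int) + (((r + 1 : Nat)) : Int) := by push_cast; ring
    have e1 : (((s + 1 : Nat)) : Int) = (s : Int) + 1 := by push_cast; ring
    rw [e2, e1]

-- ===== VERDICT (by name: the statement is the Claim_ definition above) =====
theorem lea_encrypt_spec : Claim_equal_lea_encrypt := by
  intro block key _ hpre
  unfold Spec_lea_encrypt lea_encrypt lea_encrypt_alt
  simp only []
  rw [show (24 : Int) = ((24 : Nat) : Int) by norm_num, lea_schedule key 24]
  have step1 : (PySem.List.pyRange 0 ((24 : Nat) : Int) 1).foldl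
      (fun x i => leaRoundA (PySem.List.pyGetD ((PySem.List.pyRange 0 ((24 : Nat) : Int) 1).map (leaSubkeyA key)) i 0) x) block
    = (PySem.List.pyRange 0 ((24 : Nat) : Int) 1).foldl
      (fun x i => leaRoundA (leaSubkeyA key i) x) block := by
    apply PySem.List.foldl_congr_mem
    intro acc i hi
    rcases (PySem.List.mem_pyRange_one).mp hi with ⟨h0, h24⟩
    rw [PySem.List.pyGetD_map_pyRange_of_nonneg _ _ _ _ h0 h24]
  rw [step1]
  have h := lea_main key hpre 24 0 block
  have hm0 : (((0 : Nat) % key.length : Nat) : Int) = 0 := by simp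
  have h0 : PySem.Int.band (((0 : Nat) : Int) * 2654435769) 4294967295 = 0 := by decide
  rw [hm0, h0] at h
  simp only [Nat.cast_zero, zero_add, Nat.cast_ofNat] at h ⊢
  exact h.symm ▸ rfl
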